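-- pv_equiv track=rewrite | github.com/zad0xlik/sigma-evolve | src/openmemory/app/utils/cross_project.py | _are_frameworks_similar
-- ===== SOURCE A (Python) =====
-- def _are_frameworks_similar(framework1: str, framework2: str) -> bool:
--     """Check if two frameworks are similar (e.g., React vs Vue, Django vs Flask)"""
--     framework1 = framework1.lower()
--     framework2 = framework2.lower()
--
--     # Define framework families
--     web_frameworks = [
--         ["react", "vue", "angular", "svelte"],
--         ["django", "flask", "fastapi"],
--         ["express", "koa", "hapi"],
--         ["spring", "springboot"],
--     ]
--
--     for family in web_frameworks:
--         if framework1 in family and framework2 in family: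
--             return True
--
--     return False
-- ===== SOURCE B (Python) =====
-- _FAMILIES = [
--     ["react", "vue", "angular", "svelte"],
--     ["django", "flask", "fastapi"],
--     ["express", "koa", "hapi"],
--     ["spring", "springboot"],
-- ]
--
-- # reverse index: framework name -> family index, built once
-- _FAMILY_ID = {name: i for i, family in enumerate(_FAMILIES) for name in family}
--
--
-- def _are_frameworks_similar(framework1: str, framework2: str) -> bool:
--     id1 = _FAMILY_ID.get(framework1.lower())
--     id2 = _FAMILY_ID.get(framework2.lower())
--     return id1 is not None and id1 == id2
-- ===== Notes on version B (the rewrite author's own statement) =====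
-- stated objective: idiomatic
-- what changed: Replaces the per-call scan over family lists with a prebuilt reverse index dict (name -> family id) and a single guarded comparison of the two looked-up ids.
import Mathlib
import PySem

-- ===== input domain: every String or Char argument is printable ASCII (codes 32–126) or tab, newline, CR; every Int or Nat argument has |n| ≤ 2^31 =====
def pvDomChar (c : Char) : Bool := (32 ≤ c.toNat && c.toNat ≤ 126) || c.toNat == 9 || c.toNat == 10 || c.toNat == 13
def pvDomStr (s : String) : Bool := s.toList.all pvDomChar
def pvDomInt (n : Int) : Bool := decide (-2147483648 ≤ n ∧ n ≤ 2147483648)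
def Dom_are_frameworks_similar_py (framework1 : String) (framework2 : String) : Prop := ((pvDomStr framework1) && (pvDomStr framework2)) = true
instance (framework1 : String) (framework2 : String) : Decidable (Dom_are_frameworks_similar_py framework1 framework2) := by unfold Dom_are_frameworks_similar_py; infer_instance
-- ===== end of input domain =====

-- B replaces A's per-call scan over family lists with a prebuilt reverse index
-- (name -> family id) and one guarded comparison: an idiomatic data-structure change.


-- ===== PORT A =====
def pvWebFrameworks : List (List String) :=
  [["react", "vue", "angular", "svelte"],
   ["django", "flask", "fastapi"],
   ["express", "koa", "hapi"],
   ["spring", "springboot"]]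

-- the 'for family in web_frameworks' loop with its early return
def pvFamScan (f1 f2 : String) : List (List String) → Bool
  | [] => false
  | fam :: rest => if fam.contains f1 && fam.contains f2 then true else pvFamScan f1 f2 rest

def are_frameworks_similar_py (framework1 : String) (framework2 : String) : Bool :=
  pvFamScan (PySem.Str.lower framework1) (PySem.Str.lower framework2) pvWebFrameworks

-- ===== PORT B =====
-- _FAMILY_ID = {name: i for i, family in enumerate(_FAMILIES) for name in family}
def pvFamilyId : PySem.Dict String Int :=
  (PySem.List.enumerate pvWebFrameworks).foldl
    (fun d p => p.2.foldl (fun d name => d.insert name p.1) d)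
    PySem.Dict.empty

def are_frameworks_similar_py_alt (framework1 : String) (framework2 : String) : Bool :=
  let id1 := pvFamilyId.get? (PySem.Str.lower framework1)
  let id2 := pvFamilyId.get? (PySem.Str.lower framework2)
  match id1, id2 with
  | some i, some j => i == j
  | _, _ => false

-- ===== PRECONDITION & SPEC =====
def Spec_are_frameworks_similar_py (framework1 : String) (framework2 : String) (out : Bool) : Prop := out = are_frameworks_similar_py_alt framework1 framework2
instance (framework1 : String) (framework2 : String) (out : Bool) : Decidable (Spec_are_frameworks_similar_py framework1 framework2 out) := by unfold Spec_are_frameworks_similar_py; infer_instance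

-- ===== CLAIM (what is proved, stated in full; the proofs are below) =====
def Claim_equal_are_frameworks_similar_py : Prop := ∀ (framework1 : String) (framework2 : String), Dom_are_frameworks_similar_py framework1 framework2 → Spec_are_frameworks_similar_py framework1 framework2 (are_frameworks_similar_py framework1 framework2)

-- ===== LEMMAS AND PROOFS =====

-- any string is one of the 12 known names, or distinct from all of them
theorem pvNameCases (s : String) :
    s = "react" ∨ s = "vue" ∨ s = "angular" ∨ s = "svelte" ∨
    s = "django" ∨ s = "flask" ∨ s = "fastapi" ∨
    s = "express" ∨ s = "koa" ∨ s = "hapi" ∨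
    s = "spring" ∨ s = "springboot" ∨
    (s ≠ "react" ∧ s ≠ "vue" ∧ s ≠ "angular" ∧ s ≠ "svelte" ∧
     s ≠ "django" ∧ s ≠ "flask" ∧ s ≠ "fastapi" ∧
     s ≠ "express" ∧ s ≠ "koa" ∧ s ≠ "hapi" ∧
     s ≠ "spring" ∧ s ≠ "springboot") := by
  tauto

theorem pvCore (a b : String) :
    pvFamScan a b pvWebFrameworks =
      (match pvFamilyId.get? a, pvFamilyId.get? b with
       | some i, some j => i == j
       | _, _ => false) := by
  have hd : pvFamilyId = PySem.Dict.mk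
      [("react",(0:Int)),("vue",0),("angular",0),("svelte",0),
       ("django",1),("flask",1),("fastapi",1),
       ("express",2),("koa",2),("hapi",2),
       ("spring",3),("springboot",3)] := by decide
  rcases pvNameCases a with rfl|rfl|rfl|rfl|rfl|rfl|rfl|rfl|rfl|rfl|rfl|rfl|ha <;>
    rcases pvNameCases b with rfl|rfl|rfl|rfl|rfl|rfl|rfl|rfl|rfl|rfl|rfl|rfl|hb <;>
    first
      | rfl
      | (obtain ⟨h1,h2,h3,h4,h5,h6,h7,h8,h9,h10,h11,h12⟩ := ha
         rw [hd]
         simp [pvFamScan, pvWebFrameworks, PySem.Dict.get?_mk_cons, PySem.Dict.get?, h1,h2,h3,h4,h5,h6,h7,h8,h9,h10,h11,h12, Ne.symm h1, Ne.symm h2, Ne.symm h3, Ne.symm h4, Ne.symm h5, Ne.symm h6, Ne.symm h7, Ne.symm h8, Ne.symm h9, Ne.symm h10, Ne.symm h11, Ne.symm h12])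
      | (obtain ⟨h1,h2,h3,h4,h5,h6,h7,h8,h9,h10,h11,h12⟩ := hb
         rw [hd]
         simp [pvFamScan, pvWebFrameworks, PySem.Dict.get?_mk_cons, PySem.Dict.get?, h1,h2,h3,h4,h5,h6,h7,h8,h9,h10,h11,h12, Ne.symm h1, Ne.symm h2, Ne.symm h3, Ne.symm h4, Ne.symm h5, Ne.symm h6, Ne.symm h7, Ne.symm h8, Ne.symm h9, Ne.symm h10, Ne.symm h11, Ne.symm h12])

-- ===== VERDICT (by name: the statement is the Claim_ definition above) =====
theorem are_frameworks_similar_py_spec : Claim_equal_are_frameworks_similar_py := by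
  intro f1 f2 _
  unfold Spec_are_frameworks_similar_py are_frameworks_similar_py are_frameworks_similar_py_alt
  exact pvCore _ _
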